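-- pv_equiv track=rewrite | github.com/onemorelight2024/for-ssh | DataFlow/dataflow/operators/kgqa/generate/kg_sparql_path_sampler.py | _op_io_roles
-- ===== SOURCE A (Python) =====
-- from typing import Any, Dict, List, Optional, Tuple, Union, Set
--
-- def _op_io_roles(op_name: str, params: List[str]) -> Tuple[Set[str], Set[str]]:
--     """根据 op 类型和 params 推断 (input_roles, output_roles)，供 _compute_op_order 依赖分析。"""
--     ins: Set[str] = set()
--     outs: Set[str] = set()
--     if op_name == "forward_find":
--         if len(params) >= 3:
--             ins.add(params[0])
--             outs.add(params[1])
--             outs.add(params[2])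
--     elif op_name == "forward_find_attr":
--         if len(params) >= 3:
--             ins.add(params[0])
--             outs.add(params[1])
--             outs.add(params[2])
--     elif op_name == "reverse_find":
--         if len(params) >= 3:
--             ins.add(params[2])
--             outs.add(params[0])
--             outs.add(params[1])
--     elif op_name == "sample_by_relation":
--         if len(params) >= 3:
--             ins.add(params[1])
--             outs.add(params[0])
--             outs.add(params[2])
--     elif op_name == "find_relations_between":
--         if len(params) >= 3:
--             if len(params) == 3:
--                 ins.add(params[0])
--                 ins.add(params[2])
--                 outs.add(params[1])
--             else:
--                 ins.add(params[0])
--                 ins.add(params[1])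
--                 for i in range(2, len(params) - 1):
--                     outs.add(params[i])
--                 ins.add(params[-1])
--     elif op_name == "reverse_find_attr":
--         if len(params) >= 3:
--             ins.add(params[2])
--             outs.add(params[0])
--             outs.add(params[1])
--     elif op_name in ("sample_val_gt", "sample_val_lt"):
--         if len(params) >= 3:
--             ins.add(params[2])
--             outs.add(params[0])
--             outs.add(params[1])
--     elif op_name == "list_forward_find":
--         if len(params) >= 3:
--             ins.add(params[0])
--             ins.add(params[1])
--             outs.add(params[2])
--     return ins, outs
-- ===== SOURCE B (Python) =====
-- # Single-pass re-implementation: instead of per-op branches that hand-build the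
-- # two sets, walk the parameter list once and classify each position with a
-- # per-index role function ('i' = input, 'o' = output, None = unused).
--
-- def _role(op_name, i, n):
--     """Role of parameter index i for op_name with n parameters."""
--     if op_name == "find_relations_between":
--         if n == 3:
--             return 'o' if i == 1 else 'i'
--         return 'i' if i in (0, 1, n - 1) else 'o'
--     if i > 2:
--         return None
--     if op_name in ("forward_find", "forward_find_attr"):
--         return 'i' if i == 0 else 'o'
--     if op_name in ("reverse_find", "reverse_find_attr", "sample_val_gt", "sample_val_lt"):
--         return 'i' if i == 2 else 'o'
--     if op_name == "sample_by_relation":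
--         return 'i' if i == 1 else 'o'
--     if op_name == "list_forward_find":
--         return 'o' if i == 2 else 'i'
--     return None
--
-- def _op_io_roles(op_name, params):
--     ins, outs = set(), set()
--     n = len(params)
--     if n >= 3:
--         for i, p in enumerate(params):
--             r = _role(op_name, i, n)
--             if r == 'i':
--                 ins.add(p)
--             elif r == 'o':
--                 outs.add(p)
--     return ins, outs
-- ===== Notes on version B (the rewrite author's own statement) =====
-- stated objective: alternative
-- what changed: Inverts the control flow: instead of a nine-way per-op branch that hand-builds the two sets by picking indices, B makes a single enumerate pass over the parameter list and classifies each position with a per-index role function (input/output/unused), including find_relations_between via an index rule rather than a dedicated set construction.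
import Mathlib
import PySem

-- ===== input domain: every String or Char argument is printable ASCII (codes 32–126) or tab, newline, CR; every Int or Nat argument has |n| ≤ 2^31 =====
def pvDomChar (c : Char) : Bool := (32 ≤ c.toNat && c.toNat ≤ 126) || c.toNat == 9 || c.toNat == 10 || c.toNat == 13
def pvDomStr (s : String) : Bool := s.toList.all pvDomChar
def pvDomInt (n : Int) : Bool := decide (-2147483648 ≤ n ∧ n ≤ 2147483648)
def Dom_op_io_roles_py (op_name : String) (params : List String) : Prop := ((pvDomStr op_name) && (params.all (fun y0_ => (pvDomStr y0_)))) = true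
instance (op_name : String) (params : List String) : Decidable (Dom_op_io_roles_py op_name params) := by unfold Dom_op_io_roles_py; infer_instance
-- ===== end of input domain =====

-- Header: B replaces A's per-op set construction by a single enumerate pass that
-- classifies each parameter position with a per-index role function (objective: alternative).

-- ===== PORT A =====
-- literal transliteration of A's if/elif chain; sets are PySem.Set built by add in A's order
def op_io_roles_py (op_name : String) (params : List String) : List String × List String :=
  let ins : PySem.Set String := PySem.Set.empty
  let outs : PySem.Set String := PySem.Set.empty
  if op_name == "forward_find" then
    if 3 ≤ params.length then
      (PySem.Set.add ins (PySem.List.pyGetD params 0 ""),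
       PySem.Set.add (PySem.Set.add outs (PySem.List.pyGetD params 1 "")) (PySem.List.pyGetD params 2 ""))
    else (ins, outs)
  else if op_name == "forward_find_attr" then
    if 3 ≤ params.length then
      (PySem.Set.add ins (PySem.List.pyGetD params 0 ""),
       PySem.Set.add (PySem.Set.add outs (PySem.List.pyGetD params 1 "")) (PySem.List.pyGetD params 2 ""))
    else (ins, outs)
  else if op_name == "reverse_find" then
    if 3 ≤ params.length then
      (PySem.Set.add ins (PySem.List.pyGetD params 2 ""),
       PySem.Set.add (PySem.Set.add outs (PySem.List.pyGetD params 0 "")) (PySem.List.pyGetD params 1 ""))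
    else (ins, outs)
  else if op_name == "sample_by_relation" then
    if 3 ≤ params.length then
      (PySem.Set.add ins (PySem.List.pyGetD params 1 ""),
       PySem.Set.add (PySem.Set.add outs (PySem.List.pyGetD params 0 "")) (PySem.List.pyGetD params 2 ""))
    else (ins, outs)
  else if op_name == "find_relations_between" then
    if 3 ≤ params.length then
      if params.length == 3 then
        (PySem.Set.add (PySem.Set.add ins (PySem.List.pyGetD params 0 "")) (PySem.List.pyGetD params 2 ""),
         PySem.Set.add outs (PySem.List.pyGetD params 1 ""))
      else
        let ins := PySem.Set.add (PySem.Set.add ins (PySem.List.pyGetD params 0 "")) (PySem.List.pyGetD params 1 "")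
        let outs := (PySem.List.pyRange 2 ((params.length : Int) - 1) 1).foldl
          (fun s i => PySem.Set.add s (PySem.List.pyGetD params i "")) outs
        let ins := PySem.Set.add ins (PySem.List.pyGetD params (-1) "")
        (ins, outs)
    else (ins, outs)
  else if op_name == "reverse_find_attr" then
    if 3 ≤ params.length then
      (PySem.Set.add ins (PySem.List.pyGetD params 2 ""),
       PySem.Set.add (PySem.Set.add outs (PySem.List.pyGetD params 0 "")) (PySem.List.pyGetD params 1 ""))
    else (ins, outs)
  else if op_name == "sample_val_gt" || op_name == "sample_val_lt" then
    if 3 ≤ params.length then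
      (PySem.Set.add ins (PySem.List.pyGetD params 2 ""),
       PySem.Set.add (PySem.Set.add outs (PySem.List.pyGetD params 0 "")) (PySem.List.pyGetD params 1 ""))
    else (ins, outs)
  else if op_name == "list_forward_find" then
    if 3 ≤ params.length then
      (PySem.Set.add (PySem.Set.add ins (PySem.List.pyGetD params 0 "")) (PySem.List.pyGetD params 1 ""),
       PySem.Set.add outs (PySem.List.pyGetD params 2 ""))
    else (ins, outs)
  else (ins, outs)

-- ===== PORT B =====
-- Source B's _role helper: role of parameter index i for op_name with n parameters
-- ('i' = input, 'o' = output, none = unused)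
def pvRole (op_name : String) (i : Int) (n : Int) : Option Char :=
  if op_name == "find_relations_between" then
    if n == 3 then (if i == 1 then some 'o' else some 'i')
    else if i == 0 || i == 1 || i == n - 1 then some 'i' else some 'o'
  else if 2 < i then none
  else if op_name == "forward_find" || op_name == "forward_find_attr" then
    (if i == 0 then some 'i' else some 'o')
  else if op_name == "reverse_find" || op_name == "reverse_find_attr"
        || op_name == "sample_val_gt" || op_name == "sample_val_lt" then
    (if i == 2 then some 'i' else some 'o')
  else if op_name == "sample_by_relation" then
    (if i == 1 then some 'i' else some 'o')
  else if op_name == "list_forward_find" then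
    (if i == 2 then some 'o' else some 'i')
  else none

-- Source B's single enumerate pass accumulating (ins, outs)
def op_io_roles_py_alt (op_name : String) (params : List String) : List String × List String :=
  let n : Int := params.length
  if 3 ≤ n then
    (PySem.List.enumerate params).foldl
      (fun (acc : PySem.Set String × PySem.Set String) ip =>
        match pvRole op_name ip.1 n with
        | some c => if c == 'i' then (PySem.Set.add acc.1 ip.2, acc.2)
                    else (acc.1, PySem.Set.add acc.2 ip.2)
        | none => acc)
      (PySem.Set.empty, PySem.Set.empty)
  else (PySem.Set.empty, PySem.Set.empty)

-- ===== PRECONDITION & SPEC =====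
def Spec_op_io_roles_py (op_name : String) (params : List String) (out : List String × List String) : Prop := out = op_io_roles_py_alt op_name params
instance (op_name : String) (params : List String) (out : List String × List String) : Decidable (Spec_op_io_roles_py op_name params out) := by unfold Spec_op_io_roles_py; infer_instance

-- ===== CLAIM (what is proved, stated in full; the proofs are below) =====
def Claim_equal_op_io_roles_py : Prop := ∀ (op_name : String) (params : List String), Dom_op_io_roles_py op_name params → Spec_op_io_roles_py op_name params (op_io_roles_py op_name params)

-- ===== LEMMAS AND PROOFS =====

-- abbreviation for B's fold step (proof-local)
def pvStep (op_name : String) (n : Int) (acc : PySem.Set String × PySem.Set String)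
    (ip : Int × String) : PySem.Set String × PySem.Set String :=
  match pvRole op_name ip.1 n with
  | some c => if c == 'i' then (PySem.Set.add acc.1 ip.2, acc.2)
              else (acc.1, PySem.Set.add acc.2 ip.2)
  | none => acc

lemma alt_eq_step_fold (op_name : String) (params : List String) (h : 3 ≤ params.length) :
    op_io_roles_py_alt op_name params
      = (PySem.List.enumerate params).foldl (pvStep op_name params.length)
          (PySem.Set.empty, PySem.Set.empty) := by
  unfold op_io_roles_py_alt pvStep
  rw [if_pos (by exact_mod_cast h)]

-- a fold whose step ignores every element of the list is the identity
lemma foldl_step_id (op_name : String) (n : Int) (l : List (Int × String))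
    (h : ∀ ip ∈ l, pvRole op_name ip.1 n = none) (acc : PySem.Set String × PySem.Set String) :
    l.foldl (pvStep op_name n) acc = acc := by
  induction l generalizing acc with
  | nil => rfl
  | cons x t ih =>
    have hx := h x (by simp)
    simp only [List.foldl_cons, pvStep, hx]
    exact ih (fun ip hip => h ip (by simp [hip])) acc

-- for the non-frb ops, indices ≥ 3 are unused
lemma role_none_of_ge3 (op_name : String) (i n : Int)
    (hop : op_name ≠ "find_relations_between") (hi : 3 ≤ i) :
    pvRole op_name i n = none := by
  unfold pvRole
  rw [if_neg (by simpa using hop), if_pos (by omega)]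

-- the find_relations_between (n > 3) tail: folding from index k over y :: ys,
-- where k + (len ys + 1) = n and 2 ≤ k: every index but the last is 'o', the last is 'i'
lemma frb_tail_fold (n : Int) (ys : List String) (y : String) (k : Int)
    (hk : 2 ≤ k) (hn : k + ((ys.length : Int) + 1) = n) (h3 : 3 < n)
    (ins outs : PySem.Set String) :
    (PySem.List.enumerate (y :: ys) k).foldl (pvStep "find_relations_between" n) (ins, outs)
      = (PySem.Set.add ins ((y :: ys).getLast (by simp)),
         ((y :: ys).dropLast).foldl PySem.Set.add outs) := by
  induction ys generalizing y k ins outs with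
  | nil =>
    simp only [List.length_nil, Int.natCast_zero, zero_add] at hn
    have hr : pvRole "find_relations_between" k n = some 'i' := by
      unfold pvRole
      rw [if_pos (by simp), if_neg (by simp; omega), if_pos (by simp; omega)]
    simp [PySem.List.enumerate_cons, PySem.List.enumerate_nil, pvStep, hr]
  | cons y' t ih =>
    have hn' : k + ((t.length : Int) + 2) = n := by
      simp only [List.length_cons] at hn; push_cast at hn ⊢; omega
    have hr : pvRole "find_relations_between" k n = some 'o' := by
      unfold pvRole
      rw [if_pos (by simp), if_neg (by simp; omega), if_neg (by simp; omega)]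
    rw [PySem.List.enumerate_cons, List.foldl_cons,
      show pvStep "find_relations_between" n (ins, outs) (k, y) = (ins, PySem.Set.add outs y) by
        simp [pvStep, hr]]
    rw [ih y' (k + 1) (by omega) (by push_cast at hn ⊢; omega) ins (PySem.Set.add outs y)]
    simp [List.getLast_cons]

-- A's `for i in range(a, a+k): s.add(params[i])` loop equals folding Set.add over the slice
lemma foldl_add_pyRange (xs : List String) (a k : Nat) (h : a + k ≤ xs.length)
    (s : PySem.Set String) :
    (PySem.List.pyRange (a : Int) ((a : Int) + (k : Int)) 1).foldl
      (fun s i => PySem.Set.add s (PySem.List.pyGetD xs i "")) s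
      = ((xs.drop a).take k).foldl PySem.Set.add s := by
  induction k generalizing a s with
  | zero => simp [PySem.List.pyRange_one_eq_nil]
  | succ k ih =>
    have ha : a < xs.length := by omega
    rw [show ((a : Int) + ((k + 1 : Nat) : Int)) = ((a + 1 : Nat) : Int) + (k : Int) by push_cast; ring]
    rw [show ((a : Int)) = ((a : Nat) : Int) from rfl]
    rw [PySem.List.pyRange_one_cons (by push_cast; omega)]
    rw [show ((a : Int) + 1) = ((a + 1 : Nat) : Int) by push_cast; ring]
    rw [List.foldl_cons, ih (a + 1) (by omega)]
    simp only [PySem.List.pyGetD_natCast, List.getD_eq_getElem?_getD,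
      List.getElem?_eq_getElem ha, Option.getD_some]
    rw [List.drop_eq_getElem_cons ha, List.take_succ_cons, List.foldl_cons]

theorem op_io_roles_py_spec : Claim_equal_op_io_roles_py := by
  intro op_name params _hdom
  unfold Spec_op_io_roles_py
  by_cases hl : 3 ≤ params.length
  case neg =>
    have hr : op_io_roles_py_alt op_name params = (PySem.Set.empty, PySem.Set.empty) := by
      unfold op_io_roles_py_alt
      rw [if_neg (by exact_mod_cast hl)]
    rw [hr]
    unfold op_io_roles_py
    split_ifs <;> rfl
  case pos =>
  obtain ⟨p0, p1, p2, rest, hps⟩ : ∃ p0 p1 p2 rest, params = p0 :: p1 :: p2 :: rest := by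
    match params, hl with
    | p0 :: p1 :: p2 :: rest, _ => exact ⟨p0, p1, p2, rest, rfl⟩
  by_cases hfrb : op_name = "find_relations_between"
  · subst hfrb
    rw [alt_eq_step_fold _ _ hl]
    by_cases he : params.length = 3
    · have hrest : rest = [] := by subst hps; simpa using he
      subst hps; subst hrest
      unfold op_io_roles_py
      simp only [beq_iff_eq, String.reduceEq, if_false, if_true, reduceIte,
        List.length_cons, List.length_nil]
      norm_num
      simp [PySem.List.enumerate_cons, PySem.List.enumerate_nil, pvStep, pvRole,
        PySem.List.pyGetD, PySem.List.pyGet?, PySem.List.pyIdx?, PySem.Set.empty]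
    · have hrest : rest ≠ [] := by intro h; subst hps; subst h; simp at he
      obtain ⟨r0, rt, hr⟩ := List.exists_cons_of_ne_nil hrest
      subst hps; subst hr
      have hn3 : (3 : Int) < ((p0 :: p1 :: p2 :: r0 :: rt).length : Int) := by
        simp; omega
      have r0' : pvRole "find_relations_between" 0 ((p0 :: p1 :: p2 :: r0 :: rt).length : Int) = some 'i' := by
        unfold pvRole; rw [if_pos (by simp), if_neg (by simp; omega)]; simp
      have r1' : pvRole "find_relations_between" 1 ((p0 :: p1 :: p2 :: r0 :: rt).length : Int) = some 'i' := by
        unfold pvRole; rw [if_pos (by simp), if_neg (by simp; omega)]; simp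
      rw [show PySem.List.enumerate (p0 :: p1 :: p2 :: r0 :: rt) 0
            = (0, p0) :: (1, p1) :: PySem.List.enumerate (p2 :: r0 :: rt) 2 by
          rw [PySem.List.enumerate_cons, PySem.List.enumerate_cons]
          norm_num]
      simp only [List.foldl_cons]
      rw [show pvStep "find_relations_between" ((p0 :: p1 :: p2 :: r0 :: rt).length : Int)
            (PySem.Set.empty, PySem.Set.empty) (0, p0)
            = (PySem.Set.add PySem.Set.empty p0, PySem.Set.empty) from by
          unfold pvStep; rw [r0']; rfl]
      rw [show pvStep "find_relations_between" ((p0 :: p1 :: p2 :: r0 :: rt).length : Int)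
            (PySem.Set.add PySem.Set.empty p0, PySem.Set.empty) (1, p1)
            = (PySem.Set.add (PySem.Set.add PySem.Set.empty p0) p1, PySem.Set.empty) from by
          unfold pvStep; rw [r1']; rfl]
      rw [frb_tail_fold _ (r0 :: rt) p2 2 (by omega) (by simp; ring) hn3]
      unfold op_io_roles_py
      simp only [beq_iff_eq, String.reduceEq, if_false, if_true, reduceIte]
      rw [if_pos (by simp), if_neg (by simp)]
      refine Prod.ext ?_ ?_
      · simp only
        congr 1
        · simp [PySem.List.pyGetD_ofNat']
        · exact (PySem.List.pyGetD_neg_one _ _ (List.cons_ne_nil _ _)).trans (by simp [List.getLast_cons])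
      · simp only
        rw [show ((p0 :: p1 :: p2 :: r0 :: rt).length : Int) - 1
            = ((2 : Nat) : Int) + ((rt.length + 1 : Nat) : Int) by push_cast; simp; ring,
          show ((2 : Int)) = ((2 : Nat) : Int) from rfl,
          foldl_add_pyRange (p0 :: p1 :: p2 :: r0 :: rt) 2 (rt.length + 1) (by simp; omega) PySem.Set.empty]
        congr 1
        simp [List.dropLast_eq_take, List.take_succ_cons]
  · have htail : ∀ (acc : PySem.Set String × PySem.Set String),
        (PySem.List.enumerate rest 3).foldl (pvStep op_name (params.length : Int)) acc = acc := by
      intro acc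
      refine foldl_step_id _ _ _ ?_ acc
      intro ip hip
      rw [PySem.List.mem_enumerate_iff] at hip
      obtain ⟨k, hk, rfl⟩ := hip
      exact role_none_of_ge3 _ _ _ hfrb (by push_cast; omega)
    rw [alt_eq_step_fold _ _ hl]
    subst hps
    rw [show PySem.List.enumerate (p0 :: p1 :: p2 :: rest) 0
          = (0, p0) :: (1, p1) :: (2, p2) :: PySem.List.enumerate rest 3 by
        rw [PySem.List.enumerate_cons, PySem.List.enumerate_cons, PySem.List.enumerate_cons]
        norm_num]
    simp only [List.foldl_cons]
    rw [htail]
    unfold op_io_roles_py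
    by_cases h1 : op_name = "forward_find"
    · subst h1
      simp [pvStep, pvRole, PySem.List.pyGetD_ofNat', PySem.Set.empty]
    by_cases h2 : op_name = "forward_find_attr"
    · subst h2
      simp [pvStep, pvRole, PySem.List.pyGetD_ofNat', PySem.Set.empty]
    by_cases h3 : op_name = "reverse_find"
    · subst h3
      simp [pvStep, pvRole, PySem.List.pyGetD_ofNat', PySem.Set.empty]
    by_cases h4 : op_name = "sample_by_relation"
    · subst h4
      simp [pvStep, pvRole, PySem.List.pyGetD_ofNat', PySem.Set.empty]
    by_cases h6 : op_name = "reverse_find_attr"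
    · subst h6
      simp [pvStep, pvRole, PySem.List.pyGetD_ofNat', PySem.Set.empty]
    by_cases h7 : op_name = "sample_val_gt"
    · subst h7
      simp [pvStep, pvRole, PySem.List.pyGetD_ofNat', PySem.Set.empty]
    by_cases h8 : op_name = "sample_val_lt"
    · subst h8
      simp [pvStep, pvRole, PySem.List.pyGetD_ofNat', PySem.Set.empty]
    by_cases h9 : op_name = "list_forward_find"
    · subst h9
      simp [pvStep, pvRole, PySem.List.pyGetD_ofNat', PySem.Set.empty]
    · have hnone : ∀ (i n : Int), pvRole op_name i n = none := by
        intro i n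
        unfold pvRole
        rw [if_neg (by simpa using hfrb)]
        by_cases hi : (2 : Int) < i
        · rw [if_pos (by simpa using hi)]
        · rw [if_neg (by simpa using hi), if_neg (by simp [h1, h2]),
            if_neg (by simp [h3, h6, h7, h8]), if_neg (by simpa using h4),
            if_neg (by simpa using h9)]
      simp [pvStep, hnone, h1, h2, h3, h4, h6, h7, h8, h9, hfrb]
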